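-- pv_equiv track=rewrite | github.com/CheapTrix399/LeetCode | problem890.py | num_hash
-- ===== SOURCE A (Python) =====
-- def num_hash(word):
--     uniq_words = []
--     hash = ""
--     for w in word:
--         if(w not in uniq_words):
--             uniq_words.append(w)
--         hash += str(uniq_words.index(w))
--     return hash
-- ===== SOURCE B (Python) =====
-- def num_hash(word):
--     first = {d: word.index(d) for d in set(word)}
--     return ''.join(str(sum(f < first[c] for f in first.values())) for c in word)
-- ===== Notes on version B (the rewrite author's own statement) =====
-- stated objective: alternative
-- what changed: A assigns ranks incrementally by maintaining a growing uniq list and rescanning it with list.index per character; B assigns no ranks at all: it records each distinct character's first-occurrence position once and emits, per character, the count of distinct characters whose first occurrence is strictly earlier.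
import Mathlib
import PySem

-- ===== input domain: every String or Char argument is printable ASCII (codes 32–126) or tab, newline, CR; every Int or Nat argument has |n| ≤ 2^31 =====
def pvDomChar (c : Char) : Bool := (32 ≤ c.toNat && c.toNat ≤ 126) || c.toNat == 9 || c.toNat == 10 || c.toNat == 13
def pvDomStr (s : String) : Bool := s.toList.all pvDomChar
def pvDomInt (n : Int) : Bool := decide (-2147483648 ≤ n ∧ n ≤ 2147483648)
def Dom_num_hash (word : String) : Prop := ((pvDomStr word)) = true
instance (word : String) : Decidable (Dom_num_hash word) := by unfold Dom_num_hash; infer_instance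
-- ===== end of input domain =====

-- B keeps no state: each character's rank is computed as a closed-form count — how many
-- distinct characters of word have a strictly earlier first occurrence (A instead builds
-- a growing uniq list and rescans it with list.index).

-- ===== PORT A =====
-- A's loop: keep uniq list of seen chars, append str(uniq.index(w)) each step (chars accumulated as List Char, packed at the end).
def num_hash (word : String) : String :=
  String.ofList ((word.toList.foldl
    (fun (p : List Char × List Char) w =>
      let uniq := if w ∈ p.1 then p.1 else p.1 ++ [w]
      (uniq, p.2 ++ PySem.Int.toChars (((PySem.List.index? uniq w).getD 0 : Nat) : Int)))
    ([], [])).2)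

-- ===== PORT B =====
-- word.index(x) always succeeds here (d ∈ set(word), c ∈ word), so getD 0 is exact.
-- sum(bool) is ported as countP; the dict comprehension as a foldl-insert over set(word).
def firstDict (l : List Char) : PySem.Dict Char Int :=
  (PySem.Set.ofList l).foldl
    (fun d c => d.insert c (((PySem.List.index? l c).getD 0 : Nat) : Int))
    PySem.Dict.empty

def num_hash_alt (word : String) : String :=
  let first := firstDict word.toList
  PySem.Str.join "" (word.toList.map (fun c => PySem.Int.toStr
    (((first.values.countP (fun f => decide (f < first.getD c 0))) : Nat) : Int)))

-- ===== PRECONDITION & SPEC =====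
def Spec_num_hash (word : String) (out : String) : Prop := out = num_hash_alt word
instance (word : String) (out : String) : Decidable (Spec_num_hash word out) := by unfold Spec_num_hash; infer_instance

-- ===== CLAIM (what is proved, stated in full; the proofs are below) =====
def Claim_equal_num_hash : Prop := ∀ (word : String), Dom_num_hash word → Spec_num_hash word (num_hash word)

-- ===== LEMMAS AND PROOFS =====

-- A's accumulated chars over l, started from a nodup uniq list u, expressed against the FINAL set.
theorem a_inv (l : List Char) : ∀ (u acc : List Char), u.Nodup →
    (l.foldl (fun (p : List Char × List Char) w =>
        let uniq := if w ∈ p.1 then p.1 else p.1 ++ [w]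
        (uniq, p.2 ++ PySem.Int.toChars (((PySem.List.index? uniq w).getD 0 : Nat) : Int)))
      (u, acc)).2
    = acc ++ (l.map (fun c =>
        PySem.Int.toChars (((PySem.List.index? (l.foldl PySem.Set.add u) c).getD 0 : Nat) : Int))).flatten := by
  induction l with
  | nil => intro u acc _; simp
  | cons x xs ih =>
    intro u acc hu
    simp only [List.foldl_cons, List.map_cons, List.flatten_cons]
    have hstep : (if x ∈ u then u else u ++ [x]) = PySem.Set.add u x :=
      (PySem.Set.add_eq_ite u x).symm
    rw [hstep]
    rw [ih (PySem.Set.add u x) _ (PySem.Set.nodup_add u x hu)]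
    have hidx : PySem.List.index? (xs.foldl PySem.Set.add (PySem.Set.add u x)) x
        = PySem.List.index? (PySem.Set.add u x) x := by
      have hupd : xs.foldl PySem.Set.add (PySem.Set.add u x)
          = PySem.Set.update (PySem.Set.add u x) xs := rfl
      rw [hupd, PySem.Set.update_eq_append_filter]
      exact PySem.List.index?_append_of_mem _ ((PySem.Set.mem_add u x x).mpr (Or.inr rfl))
    rw [hidx, List.append_assoc]

theorem join_empty_eq_flatten (l : List (List Char)) : PySem.Chars.join [] l = l.flatten := by
  induction l with
  | nil => simp [PySem.Chars.join_nil]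
  | cons x rest ih =>
    cases rest with
    | nil => simp [PySem.Chars.join_singleton]
    | cons y r => rw [PySem.Chars.join_cons_cons]; simp_all

-- In a list whose f-values are strictly increasing, the index of c equals the count of
-- elements with smaller f-value.
theorem index_eq_countP {α : Type} [BEq α] [LawfulBEq α] (f : α → Nat) :
    ∀ (u : List α), u.Pairwise (fun a b => f a < f b) → ∀ c ∈ u,
    PySem.List.index? u c = some (u.countP (fun d => decide (f d < f c))) := by
  intro u
  induction u with
  | nil => intro _ c hc; simp at hc
  | cons x xs ih =>
    intro hp c hc
    have hhead : ∀ b ∈ xs, f x < f b := (List.pairwise_cons.mp hp).1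
    have htail := (List.pairwise_cons.mp hp).2
    by_cases hcx : c = x
    · rw [hcx, PySem.List.index?_cons_self]
      have h0 : (x :: xs).countP (fun d => decide (f d < f x)) = 0 := by
        rw [List.countP_eq_zero]
        intro d hd
        simp only [decide_eq_true_eq] at *
        rcases List.mem_cons.mp hd with h | h
        · subst h; omega
        · have := hhead d h; omega
      rw [h0]
    · have hcxs : c ∈ xs := by
        rcases List.mem_cons.mp hc with h | h
        · exact absurd h hcx
        · exact h
      rw [PySem.List.index?_cons_of_ne xs (fun h => hcx h.symm), ih htail c hcxs]
      have hxc : f x < f c := hhead c hcxs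
      simp only [List.countP_cons, decide_eq_true_eq, Option.map_some]
      rw [if_pos (by simpa using hxc)]

-- ofList l is ordered by first occurrence: index?-in-l values are strictly increasing.
theorem ofList_pairwise_idx (l : List Char) :
    (PySem.Set.ofList l).Pairwise
      (fun a b => (PySem.List.index? l a).getD 0 < (PySem.List.index? l b).getD 0) := by
  induction l using List.reverseRecOn with
  | nil => simp [PySem.Set.ofList_nil]
  | append_singleton xs x ih =>
    rw [PySem.Set.ofList_append_singleton]
    by_cases hx : x ∈ PySem.Set.ofList xs
    · rw [PySem.Set.add_of_mem hx]
      apply List.Pairwise.imp_of_mem ?_ ih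
      intro a b ha hb hab
      have ha' : a ∈ xs := (PySem.Set.mem_ofList _ _).mp ha
      have hb' : b ∈ xs := (PySem.Set.mem_ofList _ _).mp hb
      rwa [PySem.List.index?_append_of_mem [x] ha', PySem.List.index?_append_of_mem [x] hb']
    · rw [PySem.Set.add_of_not_mem hx]
      have hxl : x ∉ xs := fun h => hx ((PySem.Set.mem_ofList _ _).mpr h)
      rw [List.pairwise_append]
      refine ⟨?_, List.pairwise_singleton _ _, ?_⟩
      · apply List.Pairwise.imp_of_mem ?_ ih
        intro a b ha hb hab
        have ha' : a ∈ xs := (PySem.Set.mem_ofList _ _).mp ha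
        have hb' : b ∈ xs := (PySem.Set.mem_ofList _ _).mp hb
        rwa [PySem.List.index?_append_of_mem [x] ha', PySem.List.index?_append_of_mem [x] hb']
      · intro a ha b hb
        have ha' : a ∈ xs := (PySem.Set.mem_ofList _ _).mp ha
        have hb' : b = x := List.mem_singleton.mp hb
        rw [hb', PySem.List.index?_append_of_mem [x] ha',
            PySem.List.index?_append_singleton_self xs x hxl]
        rcases Option.isSome_iff_exists.mp ((PySem.List.index?_isSome_iff xs a).mpr ha') with ⟨k, hk⟩
        rcases PySem.List.getElem_of_index?_eq_some hk with ⟨hklt, _, _⟩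
        rw [hk]
        simpa using hklt

-- A fold of inserts with key-determined values looks up to the value function on its keys.
theorem getD_foldl_insert_fn (f : Char → Int) :
    ∀ (ks : List Char) (d : PySem.Dict Char Int) (c : Char),
    (ks.foldl (fun d k => d.insert k (f k)) d).getD c 0
      = if c ∈ ks then f c else d.getD c 0 := by
  intro ks
  induction ks with
  | nil => intro d c; simp
  | cons k ks ih =>
    intro d c
    rw [List.foldl_cons, ih, PySem.Dict.getD_insert]
    by_cases h1 : c ∈ ks
    · rw [if_pos h1, if_pos (List.mem_cons.mpr (Or.inr h1))]
    · rw [if_neg h1]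
      by_cases h2 : c = k
      · rw [if_pos h2, if_pos (List.mem_cons.mpr (Or.inl h2)), h2]
      · rw [if_neg h2, if_neg (by simp [h1, h2])]

theorem getD_firstDict (l : List Char) (c : Char) (hc : c ∈ l) :
    (firstDict l).getD c 0 = (((PySem.List.index? l c).getD 0 : Nat) : Int) := by
  unfold firstDict
  rw [getD_foldl_insert_fn, if_pos ((PySem.Set.mem_ofList _ _).mpr hc)]

theorem values_firstDict (l : List Char) :
    (firstDict l).values
      = (PySem.Set.ofList l).map (fun k => (((PySem.List.index? l k).getD 0 : Nat) : Int)) := by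
  have hkeys : (firstDict l).keys = PySem.Set.ofList l := by
    unfold firstDict
    rw [PySem.Dict.keys_foldl_insert (f := fun _ k => (((PySem.List.index? l k).getD 0 : Nat) : Int))]
    rw [PySem.Dict.keys_empty, PySem.Set.update_nil_left, PySem.Set.ofList_ofList]
  rw [PySem.Dict.values_eq_map_keys (firstDict l) (by rw [hkeys]; exact PySem.Set.nodup_ofList l) 0,
      hkeys]
  apply List.map_congr_left
  intro k hk
  exact getD_firstDict l k ((PySem.Set.mem_ofList _ _).mp hk)

-- ===== VERDICT (by name: the statement is the Claim_ definition above) =====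
theorem num_hash_spec : Claim_equal_num_hash := by
  intro word _
  unfold Spec_num_hash num_hash num_hash_alt
  set l := word.toList with hl
  apply String.toList_injective ?_
  rw [PySem.Str.toList_join]
  simp only [List.map_map, Function.comp_def, PySem.Int.toList_toStr, String.toList_empty]
  rw [join_empty_eq_flatten, String.toList_ofList,
      a_inv l [] [] List.nodup_nil, List.nil_append]
  apply congrArg List.flatten
  apply List.map_congr_left
  intro c hc
  have hfold : l.foldl PySem.Set.add ([] : List Char) = PySem.Set.ofList l := rfl
  rw [hfold]
  have hcs : c ∈ PySem.Set.ofList l := (PySem.Set.mem_ofList _ _).mpr hc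
  rw [index_eq_countP (fun d => (PySem.List.index? l d).getD 0)
        (PySem.Set.ofList l) (ofList_pairwise_idx l) c hcs,
      values_firstDict l, getD_firstDict l c hc, List.countP_map]
  simp only [Function.comp_def, Nat.cast_lt]
  rfl
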